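-- pv_equiv track=rewrite | github.com/ayesha07a/AI-Course-Career-Switch-Classification | 22299021_AyeshaMohsina.py | buildin
-- ===== SOURCE A (Python) =====
-- def calculation(built, target, weights):
--     score = 0
--     if len(built) > len(target):
--         L = len(built)
--     else:
--         L = len(target)
--
--     for i in range(L):
--         if i < len(built):
--             a = ord(built[i])
--         else:
--             a = 0
--
--         if i < len(target):
--             b = ord(target[i])
--         else:
--             b = 0
--
--         if a > b:
--             d = a - b
--         else:
--             d = b - a
--
--         if i < len(weights):
--             w = weights[i]
--         else:
--             w = 1
--
--         score = score + (d * w)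
--
--     return -score
--
-- def buildin(P, partial, reference, weights, max_turn, alp, B):
--     if len(P) == 0:
--         return calculation(partial, reference, weights), partial
--
--     best = None
--
--     if max_turn:
--         max_val = -999999
--         for i in range(len(P)):
--             ch = P[i]
--             rest = P[:i] + P[i+1:]
--             val, res = buildin(rest, partial + ch, reference, weights, False, alp, B)
--             if val > max_val:
--                 max_val = val
--                 best = res
--             if val > alp:
--                 alp = val
--             if B <= alp:
--                 break
--         return max_val, best
--
--     else:
--         min_val = 999999
--         for i in range(len(P)):
--             ch = P[i]
--             rest = P[:i] + P[i+1:]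
--             val, res = buildin(rest, partial + ch, reference, weights, True, alp, B)
--             if val < min_val:
--                 min_val = val
--                 best = res
--             if val < B:
--                 B = val
--             if B <= alp:
--                 break
--         return min_val, best
-- ===== SOURCE B (Python) =====
-- # Negamax reformulation: one unified maximizing loop with a sign-flipped value
-- # and a negated (alpha, beta) window replaces A's two mirrored max/min loops.
-- def _score(built, target, weights):
--     total = 0
--     for i in range(max(len(built), len(target))):
--         a = ord(built[i]) if i < len(built) else 0
--         b = ord(target[i]) if i < len(target) else 0
--         w = weights[i] if i < len(weights) else 1
--         total += abs(a - b) * w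
--     return -total
--
-- def _negamax(chars, partial, reference, weights, sign, alpha, beta):
--     if not chars:
--         return sign * _score(partial, reference, weights), partial
--     m, best = -999999, None
--     pre, rem = [], chars
--     while rem:
--         ch, rem = rem[0], rem[1:]
--         g, res = _negamax(pre + rem, partial + ch, reference, weights, -sign, -beta, -alpha)
--         v = -g
--         if v > m:
--             m, best = v, res
--         if v > alpha:
--             alpha = v
--         if beta <= alpha:
--             break
--         pre = pre + [ch]
--     return m, best
--
-- def buildin(P, partial, reference, weights, max_turn, alp, B):
--     if max_turn:
--         v, best = _negamax(list(P), partial, reference, weights, 1, alp, B)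
--         return v, best
--     else:
--         v, best = _negamax(list(P), partial, reference, weights, -1, -B, -alp)
--         return -v, best
-- ===== Notes on version B (the rewrite author's own statement) =====
-- stated objective: simpler
-- what changed: A's two mirrored max/min alpha-beta loops are replaced by a single negamax search (sign-flipped leaf value and negated (alpha,beta) window), halving the search code; the distance score uses abs() and the sibling iteration carries a prefix/suffix split instead of index slicing.
import Mathlib
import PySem

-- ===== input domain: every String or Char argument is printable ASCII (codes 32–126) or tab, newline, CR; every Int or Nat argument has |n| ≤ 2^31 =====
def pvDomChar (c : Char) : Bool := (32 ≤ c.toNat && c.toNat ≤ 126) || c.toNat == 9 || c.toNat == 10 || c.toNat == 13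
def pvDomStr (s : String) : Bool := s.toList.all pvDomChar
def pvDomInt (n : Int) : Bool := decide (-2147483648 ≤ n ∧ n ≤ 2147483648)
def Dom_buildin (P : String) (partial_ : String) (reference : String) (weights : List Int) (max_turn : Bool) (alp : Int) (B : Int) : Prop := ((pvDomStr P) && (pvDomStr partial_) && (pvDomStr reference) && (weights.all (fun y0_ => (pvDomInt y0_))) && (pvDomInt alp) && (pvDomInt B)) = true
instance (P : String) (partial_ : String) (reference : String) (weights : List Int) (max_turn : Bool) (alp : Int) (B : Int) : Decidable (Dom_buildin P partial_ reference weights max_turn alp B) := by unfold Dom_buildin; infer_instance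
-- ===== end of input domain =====

-- B replaces A's two mirrored max/min alpha-beta loops by ONE negamax loop
-- (sign-flipped value, negated window); objective: simpler (half the search code).

-- ===== PORT A =====
-- strings are ported as their character lists (exact: all ops used are len, index, slice, concat);
-- the fuel parameters only make the recursions total (fuel = remaining length / iteration count, always sufficient)
def calcA (built target : List Char) (w : List Int) : Int :=
  let L := if built.length > target.length then built.length else target.length
  let score := (List.range L).foldl (fun score i =>
    let a : Int := if i < built.length then ((built.getD i ' ').toNat : Int) else 0
    let b : Int := if i < target.length then ((target.getD i ' ').toNat : Int) else 0
    let d := if a > b then a - b else b - a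
    let wi := if i < w.length then w.getD i 1 else 1
    score + d * wi) 0;
  -score

def loopMaxA (child : List Char → List Char → Int → Int → Int × Option (List Char))
    (p partial_ : List Char) :
    Nat → Nat → Int → Option (List Char) → Int → Int → Int × Option (List Char)
  | 0, _, maxVal, best, _, _ => (maxVal, best)
  | Nat.succ k, i, maxVal, best, alp, B =>
    if h : i < p.length then
      let ch := p[i]
      let rest := p.take i ++ p.drop (i+1)   -- P[:i] + P[i+1:], exact for 0 ≤ i < len
      let r := child rest (partial_ ++ [ch]) alp B
      let maxVal' := if r.1 > maxVal then r.1 else maxVal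
      let best' := if r.1 > maxVal then r.2 else best
      let alp' := if r.1 > alp then r.1 else alp
      if B ≤ alp' then (maxVal', best')
      else loopMaxA child p partial_ k (i+1) maxVal' best' alp' B
    else (maxVal, best)

def loopMinA (child : List Char → List Char → Int → Int → Int × Option (List Char))
    (p partial_ : List Char) :
    Nat → Nat → Int → Option (List Char) → Int → Int → Int × Option (List Char)
  | 0, _, minVal, best, _, _ => (minVal, best)
  | Nat.succ k, i, minVal, best, alp, B =>
    if h : i < p.length then
      let ch := p[i]
      let rest := p.take i ++ p.drop (i+1)
      let r := child rest (partial_ ++ [ch]) alp B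
      let minVal' := if r.1 < minVal then r.1 else minVal
      let best' := if r.1 < minVal then r.2 else best
      let B' := if r.1 < B then r.1 else B
      if B' ≤ alp then (minVal', best')
      else loopMinA child p partial_ k (i+1) minVal' best' alp B'
    else (minVal, best)

def goA : Nat → List Char → List Char → List Char → List Int → Bool → Int → Int →
    Int × Option (List Char)
  | 0, p, partial_, ref, w, _, _, _ =>
    if p.length = 0 then (calcA partial_ ref w, some partial_)
    else (0, none)  -- unreachable: the wrapper passes fuel = p.length
  | Nat.succ fuel, p, partial_, ref, w, mt, alp, B =>
    if p.length = 0 then (calcA partial_ ref w, some partial_)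
    else if mt then
      loopMaxA (fun rest pa a b => goA fuel rest pa ref w false a b)
        p partial_ p.length 0 (-999999) none alp B
    else
      loopMinA (fun rest pa a b => goA fuel rest pa ref w true a b)
        p partial_ p.length 0 999999 none alp B

def buildin (P : String) (partial_ : String) (reference : String) (weights : List Int) (max_turn : Bool) (alp : Int) (B : Int) : Int × Option String :=
  let r := goA P.toList.length P.toList partial_.toList reference.toList weights max_turn alp B
  (r.1, r.2.map String.mk)

-- ===== PORT B =====
def calcB (built target : List Char) (w : List Int) : Int :=
  -((List.range (max built.length target.length)).foldl (fun total i =>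
    let a : Int := if i < built.length then ((built.getD i ' ').toNat : Int) else 0
    let b : Int := if i < target.length then ((target.getD i ' ').toNat : Int) else 0
    let wi := if i < w.length then w.getD i 1 else 1
    total + |a - b| * wi) 0)

def negaLoop (child : List Char → List Char → Int → Int → Int → Int × Option (List Char))
    (partial_ : List Char) (sign : Int) :
    List Char → List Char → Int → Option (List Char) → Int → Int → Int × Option (List Char)
  | _, [], m, best, _, _ => (m, best)
  | pre, ch :: rem', m, best, alpha, beta =>
    let r := child (pre ++ rem') (partial_ ++ [ch]) (-sign) (-beta) (-alpha)
    let v := -r.1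
    let m' := if v > m then v else m
    let best' := if v > m then r.2 else best
    let alpha' := if v > alpha then v else alpha
    if beta ≤ alpha' then (m', best')
    else negaLoop child partial_ sign (pre ++ [ch]) rem' m' best' alpha' beta

def negaGo : Nat → List Char → List Char → List Char → List Int → Int → Int → Int →
    Int × Option (List Char)
  | 0, p, partial_, ref, w, sign, _, _ =>
    if p.length = 0 then (sign * calcB partial_ ref w, some partial_)
    else (0, none)  -- unreachable: the wrapper passes fuel = p.length
  | Nat.succ fuel, p, partial_, ref, w, sign, alpha, beta =>
    if p.length = 0 then (sign * calcB partial_ ref w, some partial_)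
    else negaLoop (fun rest pa s a b => negaGo fuel rest pa ref w s a b)
      partial_ sign [] p (-999999) none alpha beta

def buildin_alt (P : String) (partial_ : String) (reference : String) (weights : List Int) (max_turn : Bool) (alp : Int) (B : Int) : Int × Option String :=
  if max_turn then
    let r := negaGo P.toList.length P.toList partial_.toList reference.toList weights 1 alp B
    (r.1, r.2.map String.mk)
  else
    let r := negaGo P.toList.length P.toList partial_.toList reference.toList weights (-1) (-B) (-alp)
    (-r.1, r.2.map String.mk)

-- ===== PRECONDITION & SPEC =====
def Spec_buildin (P : String) (partial_ : String) (reference : String) (weights : List Int) (max_turn : Bool) (alp : Int) (B : Int) (out : Int × Option String) : Prop := out = buildin_alt P partial_ reference weights max_turn alp B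
instance (P : String) (partial_ : String) (reference : String) (weights : List Int) (max_turn : Bool) (alp : Int) (B : Int) (out : Int × Option String) : Decidable (Spec_buildin P partial_ reference weights max_turn alp B out) := by unfold Spec_buildin; infer_instance

-- ===== CLAIM (what is proved, stated in full; the proofs are below) =====
def Claim_equal_buildin : Prop := ∀ (P : String) (partial_ : String) (reference : String) (weights : List Int) (max_turn : Bool) (alp : Int) (B : Int), Dom_buildin P partial_ reference weights max_turn alp B → Spec_buildin P partial_ reference weights max_turn alp B (buildin P partial_ reference weights max_turn alp B)

-- ===== LEMMAS AND PROOFS =====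

theorem calcA_eq_calcB (built target : List Char) (w : List Int) :
    calcA built target w = calcB built target w := by
  simp only [calcA, calcB]
  have hL : (if built.length > target.length then built.length else target.length)
      = max built.length target.length := by split <;> omega
  rw [hL]
  congr 1
  apply PySem.List.foldl_congr_mem
  intro s i _
  have habs : ∀ a b : Int, (if a > b then a - b else b - a) = |a - b| := by
    intro a b
    by_cases h : a > b
    · rw [if_pos h, abs_of_pos (by omega)]
    · rw [if_neg h, abs_sub_comm, abs_of_nonneg (by omega)]
  simp [habs]

theorem goA_nil (fuel : Nat) (partial_ ref : List Char) (w : List Int) (mt : Bool)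
    (alp B : Int) : goA fuel [] partial_ ref w mt alp B = (calcA partial_ ref w, some partial_) := by
  cases fuel <;> rw [goA] <;> simp

theorem negaGo_nil (fuel : Nat) (partial_ ref : List Char) (w : List Int)
    (sign alpha beta : Int) :
    negaGo fuel [] partial_ ref w sign alpha beta = (sign * calcB partial_ ref w, some partial_) := by
  cases fuel <;> rw [negaGo] <;> simp

theorem loopMax_eq (fuel : Nat) (ref : List Char) (w : List Int) (p partial_ : List Char)
    (IH : ∀ (q pa : List Char) (alp B : Int), q.length < p.length →
      goA fuel q pa ref w false alp B =
        (-(negaGo fuel q pa ref w (-1) (-B) (-alp)).1,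
         (negaGo fuel q pa ref w (-1) (-B) (-alp)).2)) :
    ∀ (rem pre : List Char) (k : Nat), p = pre ++ rem → rem.length ≤ k →
      ∀ (maxVal : Int) (best : Option (List Char)) (alp B : Int),
        loopMaxA (fun rest pa a b => goA fuel rest pa ref w false a b)
            p partial_ k pre.length maxVal best alp B =
          negaLoop (fun rest pa s a b => negaGo fuel rest pa ref w s a b)
            partial_ 1 pre rem maxVal best alp B := by
  intro rem
  induction rem with
  | nil =>
    intro pre k hp _ maxVal best alp B
    subst hp
    cases k with
    | zero => rfl
    | succ k => rw [loopMaxA, dif_neg (by simp)]; rfl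
  | cons ch rem' ihr =>
    intro pre k hp hk maxVal best alp B
    subst hp
    cases k with
    | zero => simp at hk
    | succ k =>
      have hlt : pre.length < (pre ++ ch :: rem').length := by simp
      have hget : (pre ++ ch :: rem')[pre.length]'hlt = ch := by
        simp [List.getElem_append_right]
      have htake : (pre ++ ch :: rem').take pre.length = pre := by
        simpa using List.take_left pre (ch :: rem')
      have hdrop : (pre ++ ch :: rem').drop (pre.length + 1) = rem' := by
        have h2 : pre ++ ch :: rem' = (pre ++ [ch]) ++ rem' := by simp
        have h3 : pre.length + 1 = (pre ++ [ch]).length := by simp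
        rw [h2, h3]
        simpa using List.drop_left (pre ++ [ch]) rem'
      rw [loopMaxA, dif_pos hlt, negaLoop]
      simp only [hget, htake, hdrop]
      rw [IH _ _ _ _ (by simp)]
      split_ifs <;>
        first
        | rfl
        | (rw [show pre.length + 1 = (pre ++ [ch]).length from by simp]
           exact ihr _ _ (by simp) (by simpa using hk) _ _ _ _)

theorem loopMin_eq (fuel : Nat) (ref : List Char) (w : List Int) (p partial_ : List Char)
    (IH : ∀ (q pa : List Char) (alp B : Int), q.length < p.length →
      goA fuel q pa ref w true alp B = negaGo fuel q pa ref w 1 alp B) :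
    ∀ (rem pre : List Char) (k : Nat), p = pre ++ rem → rem.length ≤ k →
      ∀ (minVal : Int) (best : Option (List Char)) (alp B : Int),
        loopMinA (fun rest pa a b => goA fuel rest pa ref w true a b)
            p partial_ k pre.length minVal best alp B =
          (-(negaLoop (fun rest pa s a b => negaGo fuel rest pa ref w s a b)
              partial_ (-1) pre rem (-minVal) best (-B) (-alp)).1,
           (negaLoop (fun rest pa s a b => negaGo fuel rest pa ref w s a b)
              partial_ (-1) pre rem (-minVal) best (-B) (-alp)).2) := by
  intro rem
  induction rem with
  | nil =>
    intro pre k hp _ minVal best alp B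
    subst hp
    cases k with
    | zero => simp [loopMaxA, negaLoop, loopMinA]
    | succ k => rw [loopMinA, dif_neg (by simp), negaLoop]; simp
  | cons ch rem' ihr =>
    intro pre k hp hk minVal best alp B
    subst hp
    cases k with
    | zero => simp at hk
    | succ k =>
      have hlt : pre.length < (pre ++ ch :: rem').length := by simp
      have hget : (pre ++ ch :: rem')[pre.length]'hlt = ch := by
        simp [List.getElem_append_right]
      have htake : (pre ++ ch :: rem').take pre.length = pre := by
        simpa using List.take_left pre (ch :: rem')
      have hdrop : (pre ++ ch :: rem').drop (pre.length + 1) = rem' := by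
        have h2 : pre ++ ch :: rem' = (pre ++ [ch]) ++ rem' := by simp
        have h3 : pre.length + 1 = (pre ++ [ch]).length := by simp
        rw [h2, h3]
        simpa using List.drop_left (pre ++ [ch]) rem'
      rw [loopMinA, dif_pos hlt, negaLoop]
      simp only [hget, htake, hdrop, neg_neg]
      rw [IH _ _ _ _ (by simp)]
      set g := negaGo fuel (pre ++ rem') (partial_ ++ [ch]) ref w 1 alp B with hg
      have hiff1 : (-g.1 > -minVal) ↔ (g.1 < minVal) := by omega
      have hiff2 : (-g.1 > -B) ↔ (g.1 < B) := by omega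
      simp only [hiff1, hiff2]
      have e1 : (if g.1 < minVal then -g.1 else -minVal)
          = -(if g.1 < minVal then g.1 else minVal) := by
        by_cases h : g.1 < minVal <;> simp [h]
      have e2 : (if g.1 < B then -g.1 else -B) = -(if g.1 < B then g.1 else B) := by
        by_cases h : g.1 < B <;> simp [h]
      rw [e1, e2]
      have hiff3 : (-alp ≤ -(if g.1 < B then g.1 else B))
          ↔ ((if g.1 < B then g.1 else B) ≤ alp) := by
        by_cases h : g.1 < B <;> simp [h] <;> omega
      simp only [hiff3]
      split_ifs <;>
        first
        | simp
        | (rw [show pre.length + 1 = (pre ++ [ch]).length from by simp]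
           exact ihr _ _ (by simp) (by simpa using hk) _ _ _ _)

theorem main_eq (ref : List Char) (w : List Int) :
    ∀ (fuel : Nat) (p : List Char), p.length ≤ fuel →
      ∀ (partial_ : List Char) (alp B : Int),
        goA fuel p partial_ ref w true alp B = negaGo fuel p partial_ ref w 1 alp B ∧
        goA fuel p partial_ ref w false alp B =
          (-(negaGo fuel p partial_ ref w (-1) (-B) (-alp)).1,
           (negaGo fuel p partial_ ref w (-1) (-B) (-alp)).2) := by
  intro fuel
  induction fuel with
  | zero =>
    intro p hp partial_ alp B
    have : p = [] := List.eq_nil_of_length_eq_zero (Nat.le_zero.mp hp)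
    subst this
    rw [goA_nil, goA_nil, negaGo_nil, negaGo_nil, calcA_eq_calcB]
    constructor
    · simp
    · simp
  | succ fuel ihn =>
    intro p hp partial_ alp B
    cases p with
    | nil =>
      rw [goA_nil, goA_nil, negaGo_nil, negaGo_nil, calcA_eq_calcB]
      constructor
      · simp
      · simp
    | cons c q =>
      have hne : ¬((c :: q).length = 0) := by simp
      constructor
      · rw [goA, if_neg hne, if_pos rfl, negaGo, if_neg hne]
        have := loopMax_eq fuel ref w (c :: q) partial_
          (fun r pa alp' B' hr => (ihn r (by simp at hp hr; omega) pa alp' B').2)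
          (c :: q) [] (c :: q).length rfl le_rfl (-999999) none alp B
        simpa using this
      · rw [goA, if_neg hne, negaGo, if_neg hne]
        simp only [Bool.false_eq_true, if_false]
        have := loopMin_eq fuel ref w (c :: q) partial_
          (fun r pa alp' B' hr => (ihn r (by simp at hp hr; omega) pa alp' B').1)
          (c :: q) [] (c :: q).length rfl le_rfl 999999 none alp B
        simpa using this

-- ===== VERDICT (by name: the statement is the Claim_ definition above) =====
theorem buildin_spec : Claim_equal_buildin := by
  intro P partial_ reference weights max_turn alp B _
  unfold Spec_buildin buildin buildin_alt
  obtain ⟨h1, h2⟩ := main_eq reference.toList weights P.toList.length P.toList le_rfl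
    partial_.toList alp B
  simp only [String.length_toList] at h1 h2
  cases max_turn
  · simp [h2]
  · simp [h1]
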